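-- pv_equiv track=rewrite | github.com/FahriBilgen/networkCRM | fortress_director/pipeline/endgame_detector.py | _recommended_from_tags
-- ===== SOURCE A (Python) =====
-- from typing import Any, Dict, Mapping, Sequence
--
-- def _recommended_from_tags(tags: Sequence[str]) -> str:
--     lowered = {str(tag).lower() for tag in tags if tag}
--     if "collapse" in lowered:
--         return "desperate"
--     if "hope" in lowered:
--         return "heroic"
--     if "battle" in lowered:
--         return "strategic"
--     return "strategic"
-- ===== SOURCE B (Python) =====
-- def _recommended_from_tags(tags):
--     # One linear pass keeping the best (lowest) priority rank; no set is built.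
--     best = 3
--     for tag in tags:
--         if not tag:
--             continue
--         key = str(tag).lower()
--         if key == "collapse":
--             rank = 0
--         elif key == "hope":
--             rank = 1
--         elif key == "battle":
--             rank = 2
--         else:
--             rank = 3
--         if rank < best:
--             best = rank
--     if best == 0:
--         return "desperate"
--     if best == 1:
--         return "heroic"
--     return "strategic"
-- ===== Notes on version B (the rewrite author's own statement) =====
-- stated objective: simpler
-- what changed: Replaces the set comprehension plus three membership tests with a single pass that keeps the lowest priority rank seen and maps it to the keyword at the end.
import Mathlib
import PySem

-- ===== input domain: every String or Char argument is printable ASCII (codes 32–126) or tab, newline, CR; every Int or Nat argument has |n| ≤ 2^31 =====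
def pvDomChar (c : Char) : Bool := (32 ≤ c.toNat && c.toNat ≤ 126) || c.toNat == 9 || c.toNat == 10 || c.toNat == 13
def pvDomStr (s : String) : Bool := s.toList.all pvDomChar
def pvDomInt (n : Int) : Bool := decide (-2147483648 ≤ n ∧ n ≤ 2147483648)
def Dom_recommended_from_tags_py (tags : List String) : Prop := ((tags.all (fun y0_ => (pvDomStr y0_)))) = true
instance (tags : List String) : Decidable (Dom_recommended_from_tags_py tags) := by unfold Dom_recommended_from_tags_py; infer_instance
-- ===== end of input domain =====

-- B replaces A's set comprehension + three membership tests by one pass keeping the lowest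
-- priority rank seen (objective: simpler).

-- ===== PORT A =====
-- lowered = {str(tag).lower() for tag in tags if tag}
def recommended_from_tags_py (tags : List String) : String :=
  let lowered : PySem.Set String :=
    PySem.Set.ofList ((tags.filter (fun tag => tag ≠ "")).map PySem.Str.lower)
  if PySem.Set.contains lowered "collapse" then "desperate"
  else if PySem.Set.contains lowered "hope" then "heroic"
  else if PySem.Set.contains lowered "battle" then "strategic"
  else "strategic"

-- ===== PORT B =====
def pvRankB (key : String) : Nat :=
  if key = "collapse" then 0
  else if key = "hope" then 1
  else if key = "battle" then 2
  else 3

def pvStepB (best : Nat) (tag : String) : Nat :=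
  if tag = "" then best
  else
    let rank := pvRankB (PySem.Str.lower tag)
    if rank < best then rank else best

def recommended_from_tags_py_alt (tags : List String) : String :=
  let best := tags.foldl pvStepB 3
  if best = 0 then "desperate"
  else if best = 1 then "heroic"
  else "strategic"

-- ===== PRECONDITION & SPEC =====
def Spec_recommended_from_tags_py (tags : List String) (out : String) : Prop := out = recommended_from_tags_py_alt tags
instance (tags : List String) (out : String) : Decidable (Spec_recommended_from_tags_py tags out) := by unfold Spec_recommended_from_tags_py; infer_instance

-- ===== CLAIM (what is proved, stated in full; the proofs are below) =====
def Claim_equal_recommended_from_tags_py : Prop := ∀ (tags : List String), Dom_recommended_from_tags_py tags → Spec_recommended_from_tags_py tags (recommended_from_tags_py tags)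

-- ===== LEMMAS AND PROOFS =====

-- the list of lowered truthy tags that A's set is built from
def pvLowered (tags : List String) : List String :=
  (tags.filter (fun tag => tag ≠ "")).map PySem.Str.lower

lemma pvLowered_cons (t : String) (ts : List String) :
    pvLowered (t :: ts) =
      if t = "" then pvLowered ts else PySem.Str.lower t :: pvLowered ts := by
  by_cases ht : t = "" <;> simp [pvLowered, ht]

lemma pvFold_eq_zero (tags : List String) : ∀ (acc : Nat),
    (tags.foldl pvStepB acc = 0 ↔ acc = 0 ∨ "collapse" ∈ pvLowered tags) := by
  induction tags with
  | nil => intro acc; simp [pvLowered]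
  | cons t ts ih =>
    intro acc
    rw [List.foldl_cons, ih, pvLowered_cons]
    by_cases ht : t = ""
    · simp [pvStepB, ht]
    · simp only [pvStepB, pvRankB, ht, if_false, List.mem_cons]
      split_ifs <;>
        simp_all [(show ("collapse" = PySem.Str.lower t ↔ PySem.Str.lower t = "collapse") from eq_comm)] <;>
        omega

lemma pvFold_le_one (tags : List String) : ∀ (acc : Nat),
    (tags.foldl pvStepB acc ≤ 1 ↔
      acc ≤ 1 ∨ "collapse" ∈ pvLowered tags ∨ "hope" ∈ pvLowered tags) := by
  induction tags with
  | nil => intro acc; simp [pvLowered]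
  | cons t ts ih =>
    intro acc
    rw [List.foldl_cons, ih, pvLowered_cons]
    by_cases ht : t = ""
    · simp [pvStepB, ht]
    · simp only [pvStepB, pvRankB, ht, if_false, List.mem_cons]
      split_ifs <;>
        simp_all [(show ("collapse" = PySem.Str.lower t ↔ PySem.Str.lower t = "collapse") from eq_comm),
                  (show ("hope" = PySem.Str.lower t ↔ PySem.Str.lower t = "hope") from eq_comm)] <;>
        omega

-- ===== VERDICT (by name: the statement is the Claim_ definition above) =====
theorem recommended_from_tags_py_spec : Claim_equal_recommended_from_tags_py := by
  intro tags _
  unfold Spec_recommended_from_tags_py recommended_from_tags_py recommended_from_tags_py_alt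
  have hmem : ∀ x : String,
      (PySem.Set.contains
        (PySem.Set.ofList ((tags.filter (fun tag => tag ≠ "")).map PySem.Str.lower)) x = true)
        ↔ x ∈ pvLowered tags := by
    intro x
    rw [PySem.Set.contains_iff, PySem.Set.mem_ofList]
    exact Iff.rfl
  simp only [hmem]
  have h0 := pvFold_eq_zero tags 3
  have h1 := pvFold_le_one tags 3
  by_cases hc : "collapse" ∈ pvLowered tags
  · have hz : tags.foldl pvStepB 3 = 0 := h0.mpr (Or.inr hc)
    simp [hc, hz]
  · by_cases hh : "hope" ∈ pvLowered tags
    · have hle : tags.foldl pvStepB 3 ≤ 1 := h1.mpr (Or.inr (Or.inr hh))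
      have hne : tags.foldl pvStepB 3 ≠ 0 := fun h => by
        rcases h0.mp h with h | h
        · omega
        · exact hc h
      have hone : tags.foldl pvStepB 3 = 1 := by omega
      simp [hc, hh, hone]
    · have hge : ¬ tags.foldl pvStepB 3 ≤ 1 := fun h => by
        rcases h1.mp h with h | h | h
        · omega
        · exact hc h
        · exact hh h
      have h0' : tags.foldl pvStepB 3 ≠ 0 := by omega
      have h1' : tags.foldl pvStepB 3 ≠ 1 := by omega
      by_cases hb : "battle" ∈ pvLowered tags <;> simp [hc, hh, hb, h0', h1']
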